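-- pv_equiv track=rewrite | github.com/hel-repo/hel | hel/utils/__init__.py | parse_search_phrase
-- ===== SOURCE A (Python) =====
-- def parse_search_phrase(s):
--     result = []
--     quote = ''
--     word = ''
--     for x in range(len(s)):
--         c = s[x]
--         if not quote:
--             if c == '"' or c == "'":
--                 quote = c
--             elif c == ' ':
--                 if word:
--                     result.append(word)
--                     word = ''
--             else:
--                 word += c
--         else:
--             if c == quote:
--                 quote = ''
--             else:
--                 word += c
--     if word:
--         result.append(word)
--     return result
-- ===== SOURCE B (Python) =====
-- def parse_search_phrase(s):
--     result = []
--     parts = []  # pieces of the current word, joined when the word is flushed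
--     i = 0
--     n = len(s)
--     while i < n:
--         c = s[i]
--         if c == '"' or c == "'":
--             j = s.find(c, i + 1)
--             if j == -1:
--                 parts.append(s[i + 1:])
--                 i = n
--             else:
--                 parts.append(s[i + 1:j])
--                 i = j + 1
--         elif c == ' ':
--             word = ''.join(parts)
--             if word:
--                 result.append(word)
--             parts = []
--             i += 1
--         else:
--             parts.append(c)
--             i += 1
--     word = ''.join(parts)
--     if word:
--         result.append(word)
--     return result
-- ===== Notes on version B (the rewrite author's own statement) =====
-- stated objective: alternative
-- what changed: Replaced A's per-character state machine with a quote state variable by an index-driven while loop that jumps straight to the matching quote via s.find, buffering word pieces in a parts list joined at each flush.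
import Mathlib
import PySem

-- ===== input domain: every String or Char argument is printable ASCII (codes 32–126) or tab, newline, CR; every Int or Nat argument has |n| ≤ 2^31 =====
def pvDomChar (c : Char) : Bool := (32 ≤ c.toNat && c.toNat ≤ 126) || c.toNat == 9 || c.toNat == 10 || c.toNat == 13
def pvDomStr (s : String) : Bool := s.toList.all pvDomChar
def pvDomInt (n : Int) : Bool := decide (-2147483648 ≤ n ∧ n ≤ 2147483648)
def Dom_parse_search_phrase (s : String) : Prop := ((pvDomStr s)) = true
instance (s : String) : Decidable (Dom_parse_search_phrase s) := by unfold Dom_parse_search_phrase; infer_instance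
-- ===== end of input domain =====

-- B replaces A's per-character quote-state machine by an index loop that jumps to the
-- matching quote with s.find and appends the quoted slice at once (objective: alternative).

-- ===== PORT A =====
-- one iteration of A's for-loop over state (result, quote, word); quote '' ↦ none
def pvAStep (st : List (List Char) × Option Char × List Char) (c : Char) :
    List (List Char) × Option Char × List Char :=
  match st with
  | (result, none, word) =>
    if c = '"' ∨ c = '\'' then (result, some c, word)
    else if c = ' ' then
      (if word ≠ [] then (result ++ [word], none, []) else (result, none, word))
    else (result, none, word ++ [c])
  | (result, some q, word) =>
    if c = q then (result, none, word) else (result, some q, word ++ [c])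

def parse_search_phrase (s : String) : List String :=
  match s.toList.foldl pvAStep ([], none, []) with
  | (result, _, word) =>
    (if word ≠ [] then result ++ [word] else result).map String.ofList

-- ===== PORT B =====
-- B's while loop: the remaining suffix s[i:] is the list argument; s.find(c, i+1) over the
-- remaining characters is idxOf? on the tail, the slices become take/drop; the `parts`
-- buffer of word pieces is a list of chunks, ''.join(parts) is flatten
def pvBGo (cs : List Char) (parts : List (List Char)) (result : List (List Char)) :
    List (List Char) :=
  match cs with
  | [] =>
    let word := parts.flatten
    if word ≠ [] then result ++ [word] else result
  | c :: rest =>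
    if c = '"' ∨ c = '\'' then
      match rest.idxOf? c with
      | none =>
        -- unmatched quote: parts.append(rest), loop ends, final flush
        let word := (parts ++ [rest]).flatten
        if word ≠ [] then result ++ [word] else result
      | some j => pvBGo (rest.drop (j + 1)) (parts ++ [rest.take j]) result
    else if c = ' ' then
      let word := parts.flatten
      if word ≠ [] then pvBGo rest [] (result ++ [word]) else pvBGo rest [] result
    else pvBGo rest (parts ++ [[c]]) result
termination_by cs.length
decreasing_by all_goals simp; try omega

def parse_search_phrase_alt (s : String) : List String :=
  (pvBGo s.toList [] []).map String.ofList

-- ===== PRECONDITION & SPEC =====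
def Spec_parse_search_phrase (s : String) (out : List String) : Prop := out = parse_search_phrase_alt s
instance (s : String) (out : List String) : Decidable (Spec_parse_search_phrase s out) := by unfold Spec_parse_search_phrase; infer_instance

-- ===== CLAIM (what is proved, stated in full; the proofs are below) =====
def Claim_equal_parse_search_phrase : Prop := ∀ (s : String), Dom_parse_search_phrase s → Spec_parse_search_phrase s (parse_search_phrase s)

-- ===== LEMMAS AND PROOFS =====

-- final flush applied to A's loop state
def pvFinish (st : List (List Char) × Option Char × List Char) : List (List Char) :=
  match st with
  | (result, _, word) => if word ≠ [] then result ++ [word] else result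

-- A's fold while a quote q is open: characters accumulate into word until the first q
theorem pvFoldA_quote (cs : List Char) (q : Char) (word : List Char)
    (result : List (List Char)) :
    List.foldl pvAStep (result, some q, word) cs =
      match cs.idxOf? q with
      | none => (result, some q, word ++ cs)
      | some j => List.foldl pvAStep (result, none, word ++ cs.take j) (cs.drop (j + 1)) := by
  induction cs generalizing word with
  | nil => simp
  | cons c rest ih =>
    by_cases hc : c = q
    · subst hc
      simp [pvAStep, List.idxOf?_cons]
    · have hbeq : (c == q) = false := by simp [hc]
      have hbeq' : (q == c) = false := by simp [Ne.symm hc]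
      simp only [List.foldl_cons, pvAStep, if_neg hc, List.idxOf?_cons, ih]
      cases h : rest.idxOf? q with
      | none => simp [hc]
      | some j => simp [hc, List.take_succ_cons, List.drop_succ_cons]

-- main invariant: flushing A's fold from a closed-quote state, where A's word is the
-- concatenation of B's buffered parts, equals B's loop
theorem pvMain : ∀ n (cs : List Char), cs.length = n → ∀ (parts : List (List Char))
    (result : List (List Char)),
    pvFinish (List.foldl pvAStep (result, none, parts.flatten) cs) = pvBGo cs parts result := by
  intro n
  induction n using Nat.strong_induction_on with
  | _ n ih =>
    intro cs hlen parts result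
    match cs with
    | [] => simp [pvFinish, pvBGo]
    | c :: rest =>
      by_cases hq : c = '"' ∨ c = '\''
      · have hstep : pvAStep (result, none, parts.flatten) c = (result, some c, parts.flatten) := by
          simp [pvAStep, hq]
        rw [List.foldl_cons, hstep, pvFoldA_quote]
        cases hidx : rest.idxOf? c with
        | none =>
          simp only [pvBGo, hq, hidx]
          simp [pvFinish]
        | some j =>
          have hd : (rest.drop (j + 1)).length < n := by
            simp at hlen ⊢; omega
          have hflat : parts.flatten ++ rest.take j = (parts ++ [rest.take j]).flatten := by
            simp
          simp only []
          rw [hflat, ih (rest.drop (j + 1)).length (by omega) _ rfl]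
          simp [pvBGo, hq, hidx]
      · have hcq : ¬ (c = '"' ∨ c = '\'') := hq
        have hr : rest.length < n := by simp at hlen; omega
        by_cases hsp : c = ' '
        · subst hsp
          have hstep : pvAStep (result, none, parts.flatten) ' ' =
              (if parts.flatten ≠ [] then (result ++ [parts.flatten], none, ([] : List Char))
               else (result, none, parts.flatten)) := by
            simp [pvAStep]
          rw [List.foldl_cons, hstep]
          by_cases hw : parts.flatten = []
          · rw [if_neg (by simp [hw])]
            have h0 : parts.flatten = ([] : List (List Char)).flatten := by simp [hw]
            rw [h0, ih rest.length hr rest rfl]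
            simp [pvBGo, hw]
          · rw [if_pos (by simp [hw])]
            have h0 : ([] : List Char) = ([] : List (List Char)).flatten := by simp
            rw [h0, ih rest.length hr rest rfl]
            simp [pvBGo, hw]
        · have hstep : pvAStep (result, none, parts.flatten) c
              = (result, none, parts.flatten ++ [c]) := by
            simp [pvAStep, hcq, hsp]
          rw [List.foldl_cons, hstep]
          have hflat : parts.flatten ++ [c] = (parts ++ [[c]]).flatten := by simp
          rw [hflat, ih rest.length hr rest rfl]
          simp [pvBGo, hcq, hsp]

-- ===== VERDICT (by name: the statement is the Claim_ definition above) =====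
theorem parse_search_phrase_spec : Claim_equal_parse_search_phrase := by
  intro s _
  unfold Spec_parse_search_phrase parse_search_phrase parse_search_phrase_alt
  have hm := pvMain s.toList.length s.toList rfl [] []
  simp only [List.flatten_nil] at hm
  rw [← hm]
  cases List.foldl pvAStep ([], none, []) s.toList with
  | mk result st2 =>
    cases st2 with
    | mk quote word => simp [pvFinish]
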